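-- pv_equiv track=rewrite | github.com/bailangguihun/EMMA-Q-Back | MASEval/MASEval/music_eval_v4_single_cached_fixed.py | infer_triad
-- ===== SOURCE A (Python) =====
-- from typing import Any, Dict, List, Optional, Tuple
--
-- NOTE_NAMES = ["C","C#","D","D#","E","F","F#","G","G#","A","A#","B"]
--
-- def infer_triad(pitch_classes: List[int]) -> Optional[str]:
--     pcs = set(pitch_classes)
--     if not pcs:
--         return None
--     best = None
--     best_score = 0
--     for root in range(12):
--         maj = {root, (root + 4) % 12, (root + 7) % 12}
--         minr = {root, (root + 3) % 12, (root + 7) % 12}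
--         maj_score = len(pcs & maj)
--         min_score = len(pcs & minr)
--         if maj_score > best_score and maj_score >= 2:
--             best_score = maj_score
--             best = (root, "maj")
--         if min_score > best_score and min_score >= 2:
--             best_score = min_score
--             best = (root, "min")
--     if not best:
--         return None
--     root, q = best
--     return f"{NOTE_NAMES[root]}:{q}"
-- ===== SOURCE B (Python) =====
-- from typing import Any, Dict, List, Optional, Tuple
--
-- NOTE_NAMES = ["C","C#","D","D#","E","F","F#","G","G#","A","A#","B"]
--
-- def infer_triad(pitch_classes):
--     # Scatter pass: each in-range pitch class votes for the three roots whose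
--     # major / minor triad contains it; pitch classes outside 0..11 match no triad.
--     hits = [v for v in set(pitch_classes) if 0 <= v < 12]
--     maj_tab = {}
--     for k in [(v - o) % 12 for v in hits for o in (0, 4, 7)]:
--         maj_tab[k] = maj_tab.get(k, 0) + 1
--     min_tab = {}
--     for k in [(v - o) % 12 for v in hits for o in (0, 3, 7)]:
--         min_tab[k] = min_tab.get(k, 0) + 1
--     best = None
--     best_score = 0
--     for root in range(12):
--         maj_score = maj_tab.get(root, 0)
--         min_score = min_tab.get(root, 0)
--         if maj_score > best_score and maj_score >= 2:
--             best_score = maj_score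
--             best = (root, "maj")
--         if min_score > best_score and min_score >= 2:
--             best_score = min_score
--             best = (root, "min")
--     if not best:
--         return None
--     root, q = best
--     return f"{NOTE_NAMES[root]}:{q}"
-- ===== Notes on version B (the rewrite author's own statement) =====
-- stated objective: alternative
-- what changed: Replaces the per-root construction of 24 Python sets and set intersections by a single scatter pass: each distinct in-range pitch class votes for the three roots whose major/minor triad contains it, accumulated in two counter tables that the selection loop then reads.
import Mathlib
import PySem

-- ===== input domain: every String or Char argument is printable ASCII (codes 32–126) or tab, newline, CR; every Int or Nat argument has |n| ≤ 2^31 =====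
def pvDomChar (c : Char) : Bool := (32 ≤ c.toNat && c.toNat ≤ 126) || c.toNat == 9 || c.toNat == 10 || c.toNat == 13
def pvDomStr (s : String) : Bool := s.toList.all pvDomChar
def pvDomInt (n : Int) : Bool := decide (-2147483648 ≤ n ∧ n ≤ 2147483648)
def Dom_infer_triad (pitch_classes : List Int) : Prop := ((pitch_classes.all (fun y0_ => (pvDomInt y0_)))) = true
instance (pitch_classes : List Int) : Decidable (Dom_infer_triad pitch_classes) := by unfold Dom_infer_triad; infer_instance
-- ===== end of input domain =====

-- B replaces A's 24 per-root set intersections by one scatter pass into two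
-- counter tables (each in-range pitch class votes for the roots whose triad
-- contains it); the selection over roots is unchanged. Objective: alternative.

-- ===== PORT A =====
def pvNoteNames : List String := ["C","C#","D","D#","E","F","F#","G","G#","A","A#","B"]

def infer_triad (pitch_classes : List Int) : Option String :=
  let pcs : PySem.Set Int := PySem.Set.ofList pitch_classes
  if pcs.isEmpty then none else
  let res := (PySem.List.pyRange 0 12 1).foldl
    (fun (st : Option (Int × String) × Int) root =>
      let maj : PySem.Set Int :=
        PySem.Set.ofList [root, PySem.Int.mod (root + 4) 12, PySem.Int.mod (root + 7) 12]
      let minr : PySem.Set Int :=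
        PySem.Set.ofList [root, PySem.Int.mod (root + 3) 12, PySem.Int.mod (root + 7) 12]
      let maj_score : Int := PySem.Set.len (PySem.Set.inter pcs maj)
      let min_score : Int := PySem.Set.len (PySem.Set.inter pcs minr)
      let st1 := if maj_score > st.2 ∧ maj_score ≥ 2 then (some (root, "maj"), maj_score) else st
      if min_score > st1.2 ∧ min_score ≥ 2 then (some (root, "min"), min_score) else st1)
    ((none : Option (Int × String)), (0 : Int))
  match res.1 with
  | none => none
  | some (root, q) => some (PySem.List.pyGetD pvNoteNames root "" ++ ":" ++ q)

-- ===== PORT B =====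
def pvScatter (offs : List Int) (hits : List Int) : List Int :=
  hits.flatMap (fun v => offs.map (fun o => PySem.Int.mod (v - o) 12))

def infer_triad_alt (pitch_classes : List Int) : Option String :=
  let hits := (PySem.Set.ofList pitch_classes).filter (fun v => decide (0 ≤ v ∧ v < 12))
  let maj_tab := (pvScatter [0, 4, 7] hits).foldl
    (fun d k => d.modify k 0 (· + 1)) (PySem.Dict.empty (κ := Int) (ν := Int))
  let min_tab := (pvScatter [0, 3, 7] hits).foldl
    (fun d k => d.modify k 0 (· + 1)) (PySem.Dict.empty (κ := Int) (ν := Int))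
  let res := (PySem.List.pyRange 0 12 1).foldl
    (fun (st : Option (Int × String) × Int) root =>
      let maj_score : Int := maj_tab.getD root 0
      let min_score : Int := min_tab.getD root 0
      let st1 := if maj_score > st.2 ∧ maj_score ≥ 2 then (some (root, "maj"), maj_score) else st
      if min_score > st1.2 ∧ min_score ≥ 2 then (some (root, "min"), min_score) else st1)
    ((none : Option (Int × String)), (0 : Int))
  match res.1 with
  | none => none
  | some (root, q) => some (PySem.List.pyGetD pvNoteNames root "" ++ ":" ++ q)

-- ===== PRECONDITION & SPEC =====
def Spec_infer_triad (pitch_classes : List Int) (out : Option String) : Prop := out = infer_triad_alt pitch_classes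
instance (pitch_classes : List Int) (out : Option String) : Decidable (Spec_infer_triad pitch_classes out) := by unfold Spec_infer_triad; infer_instance

-- ===== CLAIM (what is proved, stated in full; the proofs are below) =====
def Claim_equal_infer_triad : Prop := ∀ (pitch_classes : List Int), Dom_infer_triad pitch_classes → Spec_infer_triad pitch_classes (infer_triad pitch_classes)

-- ===== LEMMAS AND PROOFS =====



theorem pvContainsTriad (v r m2 m3 : Int) :
    PySem.Set.contains (PySem.Set.ofList [r, m2, m3]) v
      = decide (v = r ∨ v = m2 ∨ v = m3) := by
  rcases hb : PySem.Set.contains (PySem.Set.ofList [r, m2, m3]) v with _ | _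
  · symm
    rw [decide_eq_false_iff_not]
    intro hmem
    have hc : PySem.Set.contains (PySem.Set.ofList [r, m2, m3]) v = true := by
      rw [PySem.Set.contains_iff, PySem.Set.mem_ofList]
      simpa using hmem
    rw [hb] at hc; exact Bool.false_ne_true hc
  · symm
    rw [decide_eq_true_iff]
    have := (PySem.Set.contains_iff _ v).mp hb
    rw [PySem.Set.mem_ofList] at this
    simpa using this

theorem pvHitCount (v o2 o3 r : Int) (h2 : 0 < o2) (h23 : o2 < o3) (h3 : o3 < 12)
    (hr : 0 ≤ r) (hr' : r < 12) :
    (if 0 ≤ v ∧ v < 12 then List.count r [v % 12, (v - o2) % 12, (v - o3) % 12] else 0)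
      = (if v = r ∨ v = (r + o2) % 12 ∨ v = (r + o3) % 12 then 1 else 0) := by
  simp only [List.count_cons, List.count_nil, beq_iff_eq]
  split_ifs <;> omega

theorem pvScoreEq (L : List Int) (o2 o3 r : Int) (h2 : 0 < o2) (h23 : o2 < o3) (h3 : o3 < 12)
    (hr : 0 ≤ r) (hr' : r < 12) :
    ((pvScatter [0, o2, o3] (L.filter (fun v => decide (0 ≤ v ∧ v < 12)))).count r : Int)
      = PySem.Set.len (PySem.Set.inter L
          (PySem.Set.ofList [r, PySem.Int.mod (r + o2) 12, PySem.Int.mod (r + o3) 12])) := by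
  have h12 : (0:Int) < 12 := by norm_num
  simp only [PySem.Int.mod_eq_emod_of_pos h12]
  have hmain : (pvScatter [0, o2, o3] (L.filter (fun v => decide (0 ≤ v ∧ v < 12)))).count r
      = (L.filter (fun x => PySem.Set.contains
          (PySem.Set.ofList [r, (r + o2) % 12, (r + o3) % 12]) x)).length := by
    induction L with
    | nil => rfl
    | cons v L ih =>
      have hit := pvHitCount v o2 o3 r h2 h23 h3 hr hr'
      have hcons : ∀ hs : List Int, pvScatter [0, o2, o3] (v :: hs)
          = [v % 12, (v - o2) % 12, (v - o3) % 12] ++ pvScatter [0, o2, o3] hs := by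
        intro hs; simp [pvScatter]
      rw [List.filter_cons, List.filter_cons, pvContainsTriad]
      simp only [decide_eq_true_eq]
      by_cases hv : 0 ≤ v ∧ v < 12
      · by_cases hm : v = r ∨ v = (r + o2) % 12 ∨ v = (r + o3) % 12
        · rw [if_pos hv, if_pos hm, hcons, List.count_append, List.length_cons, ih]
          have h1 : List.count r [v % 12, (v - o2) % 12, (v - o3) % 12] = 1 := by
            simpa [hv, hm] using hit
          omega
        · rw [if_pos hv, if_neg hm, hcons, List.count_append, ih]
          have h0 : List.count r [v % 12, (v - o2) % 12, (v - o3) % 12] = 0 := by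
            simpa [hv, hm] using hit
          omega
      · by_cases hm : v = r ∨ v = (r + o2) % 12 ∨ v = (r + o3) % 12
        · simp [hv, hm] at hit
        · rw [if_neg hv, if_neg hm, ih]
  rw [hmain]
  rfl

theorem pvOfListNil (xs : List Int) (h : PySem.Set.ofList xs = []) : xs = [] := by
  cases xs with
  | nil => rfl
  | cons x t =>
    have hx : x ∈ PySem.Set.ofList (x :: t) := by
      rw [PySem.Set.mem_ofList]; exact List.mem_cons_self
    rw [h] at hx
    exact absurd hx (List.not_mem_nil)

-- ===== VERDICT (by name: the statement is the Claim_ definition above) =====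
set_option maxRecDepth 4000 in
theorem infer_triad_spec : Claim_equal_infer_triad := by
  intro xs _
  unfold Spec_infer_triad infer_triad infer_triad_alt
  dsimp only
  by_cases hemp : (PySem.Set.ofList xs).isEmpty
  · rw [if_pos hemp]
    have hx : xs = [] := pvOfListNil xs (List.isEmpty_iff.mp hemp)
    subst hx
    decide
  · rw [if_neg hemp]
    have hstep : ∀ (st : Option (Int × String) × Int), ∀ root ∈ PySem.List.pyRange 0 12 1,
        (fun (st : Option (Int × String) × Int) root =>
          let maj : PySem.Set Int :=
            PySem.Set.ofList [root, PySem.Int.mod (root + 4) 12, PySem.Int.mod (root + 7) 12]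
          let minr : PySem.Set Int :=
            PySem.Set.ofList [root, PySem.Int.mod (root + 3) 12, PySem.Int.mod (root + 7) 12]
          let maj_score : Int := PySem.Set.len (PySem.Set.inter (PySem.Set.ofList xs) maj)
          let min_score : Int := PySem.Set.len (PySem.Set.inter (PySem.Set.ofList xs) minr)
          let st1 := if maj_score > st.2 ∧ maj_score ≥ 2 then (some (root, "maj"), maj_score) else st
          if min_score > st1.2 ∧ min_score ≥ 2 then (some (root, "min"), min_score) else st1) st root
        = (fun (st : Option (Int × String) × Int) root =>
          let maj_score : Int := ((pvScatter [0, 4, 7] ((PySem.Set.ofList xs).filter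
              (fun v => decide (0 ≤ v ∧ v < 12)))).foldl
              (fun d k => d.modify k 0 (· + 1)) (PySem.Dict.empty (κ := Int) (ν := Int))).getD root 0
          let min_score : Int := ((pvScatter [0, 3, 7] ((PySem.Set.ofList xs).filter
              (fun v => decide (0 ≤ v ∧ v < 12)))).foldl
              (fun d k => d.modify k 0 (· + 1)) (PySem.Dict.empty (κ := Int) (ν := Int))).getD root 0
          let st1 := if maj_score > st.2 ∧ maj_score ≥ 2 then (some (root, "maj"), maj_score) else st
          if min_score > st1.2 ∧ min_score ≥ 2 then (some (root, "min"), min_score) else st1) st root := by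
      intro st root hroot
      obtain ⟨hr0, hr1, -⟩ := (PySem.List.mem_pyRange_iff_of_pos (by norm_num) root).mp hroot
      dsimp only
      rw [← PySem.Dict.counter_eq_foldl, ← PySem.Dict.counter_eq_foldl,
        PySem.Dict.getD_counter, PySem.Dict.getD_counter,
        pvScoreEq (PySem.Set.ofList xs) 4 7 root (by norm_num) (by norm_num) (by norm_num) hr0 hr1,
        pvScoreEq (PySem.Set.ofList xs) 3 7 root (by norm_num) (by norm_num) (by norm_num) hr0 hr1]
    rw [PySem.List.foldl_congr_mem (PySem.List.pyRange 0 12 1) _ _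
      ((none : Option (Int × String)), (0 : Int)) hstep]
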